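-- pv_equiv track=rewrite | github.com/rishabhjainfinal/technojam-task | task_4/Q3.py | answer
-- ===== SOURCE A (Python) =====
-- def answer(string):
--     new_string = ""
--     for index,letter in enumerate(string) :
--         if ord(letter)==97:
--             new_string += string[index:]
--             break # 97 == a
--         else:
--             new_string += chr(ord(letter)-1)
--     return new_string
-- ===== SOURCE B (Python) =====
-- def answer(string):
--     idx = string.find('a')
--     if idx == -1:
--         return ''.join(chr(ord(c) - 1) for c in string)
--     return ''.join(chr(ord(c) - 1) for c in string[:idx]) + string[idx:]
-- ===== Notes on version B (the rewrite author's own statement) =====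
-- stated objective: simpler
-- what changed: B locates the first 'a' up front with string.find and then does one map over the prefix plus a verbatim suffix copy, instead of A's fused enumerate loop that decrements with break-on-'a' while accumulating by repeated string concatenation.
import Mathlib
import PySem

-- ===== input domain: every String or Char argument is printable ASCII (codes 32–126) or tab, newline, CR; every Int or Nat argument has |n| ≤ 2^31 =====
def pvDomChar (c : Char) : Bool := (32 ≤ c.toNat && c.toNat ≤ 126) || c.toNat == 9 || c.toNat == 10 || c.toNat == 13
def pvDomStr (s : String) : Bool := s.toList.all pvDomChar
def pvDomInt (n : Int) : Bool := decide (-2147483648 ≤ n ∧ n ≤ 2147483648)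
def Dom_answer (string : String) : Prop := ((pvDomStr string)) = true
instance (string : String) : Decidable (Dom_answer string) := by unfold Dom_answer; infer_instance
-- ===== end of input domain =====

-- B finds the first 'a' with find, then maps the prefix and copies the suffix, instead of A's fused scan-and-break loop (objective: simpler).


-- ===== PORT A =====
-- A's loop over enumerate(string): index counter, break at ord==97 appending string[index:].
def answerGoA (full : List Char) : List Char → Nat → List Char → List Char
  | [], _, acc => acc
  | c :: cs, i, acc =>
    if c.toNat = 97 then acc ++ full.drop i          -- string[index:] with 0 ≤ index < len = drop
    else answerGoA full cs (i + 1) (acc ++ [Char.ofNat (c.toNat - 1)])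

def answer (string : String) : String :=
  String.ofList (answerGoA string.toList string.toList 0 [])

-- ===== PORT B =====
-- Source B: idx = string.find('a'); map prefix, copy suffix.
def answer_alt (string : String) : String :=
  let l := string.toList
  match l.findIdx? (fun c => c = 'a') with           -- string.find('a')
  | none => String.ofList (l.map (fun c => Char.ofNat (c.toNat - 1)))
  | some i => String.ofList ((l.take i).map (fun c => Char.ofNat (c.toNat - 1)) ++ l.drop i)

-- ===== PRECONDITION & SPEC =====
def Spec_answer (string : String) (out : String) : Prop := out = answer_alt string
instance (string : String) (out : String) : Decidable (Spec_answer string out) := by unfold Spec_answer; infer_instance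

-- ===== CLAIM (what is proved, stated in full; the proofs are below) =====
def Claim_equal_answer : Prop := ∀ (string : String), Dom_answer string → Spec_answer string (answer string)

-- ===== LEMMAS AND PROOFS =====

-- canonical value of both programs on a char list
def altList : List Char → List Char
  | [] => []
  | c :: cs => if c.toNat = 97 then c :: cs else Char.ofNat (c.toNat - 1) :: altList cs

theorem answerGoA_eq (full : List Char) :
    ∀ (rest : List Char) (i : Nat) (acc : List Char), full.drop i = rest →
      answerGoA full rest i acc = acc ++ altList rest := by
  intro rest
  induction rest with
  | nil => intro i acc _; simp [answerGoA, altList]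
  | cons c cs ih =>
    intro i acc hdrop
    by_cases h : c.toNat = 97
    · simp [answerGoA, altList, h, hdrop]
    · have hdrop' : full.drop (i + 1) = cs := by
        rw [← List.drop_drop, hdrop]; rfl
      simp [answerGoA, altList, h, ih (i + 1) _ hdrop']

theorem altList_eq_find (l : List Char) :
    altList l = (match l.findIdx? (fun c => c = 'a') with
      | none => l.map (fun c => Char.ofNat (c.toNat - 1))
      | some i => (l.take i).map (fun c => Char.ofNat (c.toNat - 1)) ++ l.drop i) := by
  induction l with
  | nil => simp [altList]
  | cons c cs ih =>
    by_cases h : c = 'a'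
    · simp [altList, h, List.findIdx?_cons]
    · have h97 : ¬ c.toNat = 97 := fun hn => h (Char.ext (UInt32.toNat_inj.mp hn))
      simp only [altList, h97, if_false, List.findIdx?_cons, h, decide_false]
      cases hf : cs.findIdx? (fun c => c = 'a') with
      | none => simp [hf] at ih; simp [ih]
      | some i => simp [hf] at ih; simp [ih]

-- ===== VERDICT (by name: the statement is the Claim_ definition above) =====
theorem answer_spec : Claim_equal_answer := by
  intro s _
  show answer s = answer_alt s
  rw [answer, answer_alt, answerGoA_eq _ _ 0 [] (by simp), altList_eq_find]
  cases s.toList.findIdx? (fun c => c = 'a') <;> simp
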